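-- pv_equiv track=rewrite | github.com/Aaron-Lilly/symphainy-production | tests_old_archive/fixtures/foundation_usage_validator.py | _is_in_type_checking_block
-- ===== SOURCE A (Python) =====
-- from typing import List, Dict, Any, Optional
--
-- def _is_in_type_checking_block(lines: List[str], line_index: int) -> bool:
--     """Check if line is inside a TYPE_CHECKING block."""
--     in_type_checking = False
--     for i in range(line_index + 1):
--         line = lines[i]
--         if 'if TYPE_CHECKING:' in line or 'if TYPE_CHECKING' in line:
--             in_type_checking = True
--         elif in_type_checking:
--             # Check if we've exited the TYPE_CHECKING block
--             stripped = line.strip()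
--             if stripped and not (stripped.startswith('    ') or stripped.startswith('\t') or stripped == ''):
--                 in_type_checking = False
--     return in_type_checking
-- ===== SOURCE B (Python) =====
-- def _is_in_type_checking_block(lines, line_index):
--     """Check if line is inside a TYPE_CHECKING block."""
--     for i in range(line_index, -1, -1):
--         line = lines[i]
--         if 'if TYPE_CHECKING' in line:
--             return True
--         if line.strip():
--             return False
--     return False
-- ===== Notes on version B (the rewrite author's own statement) =====
-- stated objective: simpler
-- what changed: B scans backward from line_index with early returns (nearest preceding non-blank line decides), dropping A's forward pass and its accumulator plus the dead startswith-after-strip checks.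
import Mathlib
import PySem

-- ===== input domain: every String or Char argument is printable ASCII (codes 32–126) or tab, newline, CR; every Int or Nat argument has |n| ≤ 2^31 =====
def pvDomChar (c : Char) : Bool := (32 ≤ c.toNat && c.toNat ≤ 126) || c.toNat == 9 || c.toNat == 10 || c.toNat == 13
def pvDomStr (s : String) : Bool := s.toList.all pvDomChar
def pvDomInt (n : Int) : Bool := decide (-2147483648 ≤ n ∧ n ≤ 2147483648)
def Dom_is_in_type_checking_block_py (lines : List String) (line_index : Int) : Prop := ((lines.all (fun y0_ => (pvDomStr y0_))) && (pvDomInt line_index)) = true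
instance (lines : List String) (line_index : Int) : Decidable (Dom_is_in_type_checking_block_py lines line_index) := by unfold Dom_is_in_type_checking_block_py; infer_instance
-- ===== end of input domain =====

-- B replaces A's forward accumulator scan by a backward scan from line_index with early
-- returns (the nearest preceding non-blank line decides); objective: simpler.


-- ===== PORT A =====
-- Literal port of A: forward loop over range(line_index + 1) carrying the in_type_checking flag.
-- Under Pre_ every visited index is in range, so the .getD "" default is never reached.
def is_in_type_checking_block_py (lines : List String) (line_index : Int) : Bool :=
  (PySem.List.pyRange 0 (line_index + 1)).foldl
    (fun in_type_checking i =>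
      let line := (PySem.List.pyGet? lines i).getD ""
      if PySem.Str.isIn "if TYPE_CHECKING:" line || PySem.Str.isIn "if TYPE_CHECKING" line then
        true
      else if in_type_checking then
        let stripped := PySem.Str.strip line
        if stripped ≠ "" ∧ ¬(PySem.Str.startswith stripped "    " = true ∨
            PySem.Str.startswith stripped "\t" = true ∨ stripped = "") then
          false
        else in_type_checking
      else in_type_checking)
    false

-- ===== PORT B =====
-- Port of Source B's backward loop: scan from index i down to 0 with early returns.
def pvAltGo (lines : List String) (i : Nat) : Bool :=
  let line := (PySem.List.pyGet? lines (i : Int)).getD ""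
  if PySem.Str.isIn "if TYPE_CHECKING" line then true
  else if PySem.Str.strip line ≠ "" then false
  else if i = 0 then false
  else pvAltGo lines (i - 1)
termination_by i
decreasing_by omega

def is_in_type_checking_block_py_alt (lines : List String) (line_index : Int) : Bool :=
  if line_index < 0 then false else pvAltGo lines line_index.toNat

-- ===== PRECONDITION & SPEC =====
-- Pre_ excludes exactly the inputs where both Pythons raise IndexError (0 ≤ line_index and
-- line_index ≥ len(lines)); on every other input both return.
def Pre_is_in_type_checking_block_py (lines : List String) (line_index : Int) : Prop :=
  line_index < (lines.length : Int)
instance (lines : List String) (line_index : Int) : Decidable (Pre_is_in_type_checking_block_py lines line_index) := by unfold Pre_is_in_type_checking_block_py; infer_instance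

def pvWitness_is_in_type_checking_block_py : List String × Int :=
  (["if TYPE_CHECKING:", "    import os"], 1)

def Spec_is_in_type_checking_block_py (lines : List String) (line_index : Int) (out : Bool) : Prop := out = is_in_type_checking_block_py_alt lines line_index
instance (lines : List String) (line_index : Int) (out : Bool) : Decidable (Spec_is_in_type_checking_block_py lines line_index out) := by unfold Spec_is_in_type_checking_block_py; infer_instance

-- ===== CLAIM (what is proved, stated in full; the proofs are below) =====
def Claim_equal_is_in_type_checking_block_py : Prop := ∀ (lines : List String) (line_index : Int), Dom_is_in_type_checking_block_py lines line_index → Pre_is_in_type_checking_block_py lines line_index → Spec_is_in_type_checking_block_py lines line_index (is_in_type_checking_block_py lines line_index)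

-- ===== LEMMAS AND PROOFS =====

-- A nonempty strip result starts with a non-whitespace character.
theorem pv_strip_head_not_space (l : List Char) (c : Char) (t : List Char)
    (h : PySem.Chars.strip l = c :: t) : PySem.Chars.isspace c = false := by
  unfold PySem.Chars.strip PySem.Chars.rstrip PySem.Chars.lstrip at h
  have hpre : (List.dropWhile PySem.Chars.isspace
      (List.dropWhile PySem.Chars.isspace l).reverse).reverse <+: List.dropWhile PySem.Chars.isspace l := by
    have := List.dropWhile_suffix (p := PySem.Chars.isspace)
      (l := (List.dropWhile PySem.Chars.isspace l).reverse)
    have := List.IsSuffix.reverse this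
    simpa using this
  rw [h] at hpre
  cases hme : List.dropWhile PySem.Chars.isspace l with
  | nil => rw [hme] at hpre; simp at hpre
  | cons a t' =>
    have hne : List.dropWhile PySem.Chars.isspace l ≠ [] := by rw [hme]; simp
    have hh := List.head_dropWhile_not (p := PySem.Chars.isspace) hne
    have ha : PySem.Chars.isspace a = false := by
      have hha : (List.dropWhile PySem.Chars.isspace l).head hne = a := by simp [hme]
      rwa [hha] at hh
    rw [hme] at hpre
    obtain ⟨u, hu⟩ := hpre
    cases hu
    exact ha

-- A's block-exit condition collapses to "the stripped line is nonempty".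
theorem pv_cond_eq (line : String) :
    ((PySem.Str.strip line ≠ "" ∧ ¬(PySem.Str.startswith (PySem.Str.strip line) "    " = true ∨
        PySem.Str.startswith (PySem.Str.strip line) "\t" = true ∨ PySem.Str.strip line = ""))
      ↔ PySem.Str.strip line ≠ "") := by
  constructor
  · rintro ⟨h, -⟩; exact h
  · intro h
    refine ⟨h, ?_⟩
    have hnil : (PySem.Str.strip line).toList ≠ [] := by
      intro he
      apply h
      have : (PySem.Str.strip line).toList = ("" : String).toList := he
      exact String.toList_inj.mp this
    cases hc : (PySem.Str.strip line).toList with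
    | nil => exact absurd hc hnil
    | cons c t =>
      have hcs : PySem.Chars.strip line.toList = c :: t := by
        rw [← PySem.Str.toList_strip]; exact hc
      have hcf := pv_strip_head_not_space _ _ _ hcs
      rintro (hsw | hsw | hsw)
      · rw [PySem.Str.startswith_eq, hc] at hsw
        simp [PySem.Chars.startswith, List.isPrefixOf] at hsw
        rw [← hsw.1] at hcf
        simp [PySem.Chars.isspace] at hcf
      · rw [PySem.Str.startswith_eq, hc] at hsw
        simp [PySem.Chars.startswith, List.isPrefixOf] at hsw
        rw [← hsw] at hcf
        simp [PySem.Chars.isspace] at hcf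
      · exact h hsw

-- A's double marker test collapses to B's single one.
theorem pv_marker_eq (line : String) :
    (PySem.Str.isIn "if TYPE_CHECKING:" line || PySem.Str.isIn "if TYPE_CHECKING" line)
      = PySem.Str.isIn "if TYPE_CHECKING" line := by
  cases hb : PySem.Str.isIn "if TYPE_CHECKING" line
  · simp only [Bool.or_false]
    cases ha : PySem.Str.isIn "if TYPE_CHECKING:" line
    · rfl
    · exfalso
      rw [PySem.Str.isIn_iff_infix] at ha
      have hin : PySem.Str.isIn "if TYPE_CHECKING" line = true := by
        rw [PySem.Str.isIn_iff_infix]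
        exact List.IsInfix.trans ⟨[], [':'], by decide⟩ ha
      rw [hb] at hin
      cases hin
  · simp

-- A's loop body, pointwise, is B's decision on that single line.
theorem pv_step_eq (lines : List String) (acc : Bool) (i : Int) :
    List.foldl (fun in_type_checking (i : Int) =>
      let line := (PySem.List.pyGet? lines i).getD ""
      if PySem.Str.isIn "if TYPE_CHECKING:" line || PySem.Str.isIn "if TYPE_CHECKING" line then
        true
      else if in_type_checking then
        let stripped := PySem.Str.strip line
        if stripped ≠ "" ∧ ¬(PySem.Str.startswith stripped "    " = true ∨
            PySem.Str.startswith stripped "\t" = true ∨ stripped = "") then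
          false
        else in_type_checking
      else in_type_checking) acc [i]
    = (if PySem.Str.isIn "if TYPE_CHECKING" ((PySem.List.pyGet? lines i).getD "") then true
       else if PySem.Str.strip ((PySem.List.pyGet? lines i).getD "") ≠ "" then false
       else acc) := by
  rw [List.foldl_cons, List.foldl_nil]
  simp only []
  rw [pv_marker_eq]
  by_cases hm : PySem.Str.isIn "if TYPE_CHECKING" ((PySem.List.pyGet? lines i).getD "") = true
  · rw [if_pos hm, if_pos hm]
  · rw [if_neg hm, if_neg hm]
    cases acc
    · rw [if_neg (by simp : ¬ (false = true))]
      split <;> rfl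
    · rw [if_pos rfl]
      simp only [pv_cond_eq]

theorem pv_range_nil (a b : Int) (h : b ≤ a) : PySem.List.pyRange a b = [] := by
  unfold PySem.List.pyRange
  simp only [if_neg (by norm_num : ¬ (1:Int) = 0)]
  have : ¬ a < b := by omega
  simp [this]

theorem pv_range_single (a : Int) : PySem.List.pyRange a (a+1) = [a] := by
  rw [PySem.List.pyRange_one_cons (by omega), pv_range_nil _ _ (by omega)]

theorem pv_main (lines : List String) (k : Nat) :
    is_in_type_checking_block_py lines (k : Int) = pvAltGo lines k := by
  induction k with
  | zero =>
    unfold is_in_type_checking_block_py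
    have h01 : PySem.List.pyRange 0 (((0:Nat):Int) + 1) = [(0:Int)] := by
      simpa using pv_range_single 0
    rw [h01, pv_step_eq lines false 0]
    conv_rhs => rw [pvAltGo]
    norm_num
  | succ j ih =>
    unfold is_in_type_checking_block_py at ih ⊢
    have hsplit : PySem.List.pyRange 0 ((j : Int) + 1 + 1)
        = PySem.List.pyRange 0 ((j : Int) + 1) ++ [(j : Int) + 1] := by
      rw [PySem.List.pyRange_one_append 0 ((j : Int) + 1) ((j : Int) + 1 + 1) (by omega) (by omega),
        pv_range_single]
    have hcast : ((j + 1 : Nat) : Int) = (j : Int) + 1 := by push_cast; ring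
    rw [hcast, hsplit, List.foldl_append]
    rw [ih]
    rw [pv_step_eq lines (pvAltGo lines j) ((j : Int) + 1)]
    conv_rhs => rw [pvAltGo]
    simp only [← hcast]
    norm_num

-- ===== VERDICT (by name: the statement is the Claim_ definition above) =====
theorem is_in_type_checking_block_py_spec : Claim_equal_is_in_type_checking_block_py := by
  intro lines line_index _ _
  unfold Spec_is_in_type_checking_block_py is_in_type_checking_block_py_alt
  by_cases hneg : line_index < 0
  · rw [if_pos hneg]
    unfold is_in_type_checking_block_py
    rw [pv_range_nil 0 (line_index + 1) (by omega)]
    rfl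
  · rw [if_neg hneg]
    have hk : line_index = ((line_index.toNat : Nat) : Int) := by omega
    rw [hk]
    exact pv_main lines line_index.toNat
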